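-- pv_equiv track=rewrite | github.com/lookinmin/CodingTest | Programmers/Lv2/할인 행사.py | check
-- ===== SOURCE A (Python) =====
-- def check(shop, discount):
--     tmp = shop.copy()
--     for t in discount:
--         if t in tmp:
--             if tmp[t] > 0:
--                 tmp[t] -= 1
--
--     if sum(tmp.values()) == 0:
--         return True
--
--     return False
-- ===== SOURCE B (Python) =====
-- def check(shop, discount):
--     cnt = {}
--     for t in discount:
--         cnt[t] = cnt.get(t, 0) + 1
--     return all(cnt.get(k, 0) >= v for k, v in shop.items())
-- ===== Notes on version B (the rewrite author's own statement) =====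
-- stated objective: idiomatic
-- what changed: Instead of copying the wanted dict and decrementing it (clamped at zero) while scanning the discount list, B builds a frequency table of the discount list once and checks all(cnt[k] >= v) over the wanted dict, mutating nothing.
-- outside the precondition, e.g. on check({'a': -1}, []): A returns False, B returns True; on check({'a': 1, 'b': -1}, []): A returns True, B returns False
import Mathlib
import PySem

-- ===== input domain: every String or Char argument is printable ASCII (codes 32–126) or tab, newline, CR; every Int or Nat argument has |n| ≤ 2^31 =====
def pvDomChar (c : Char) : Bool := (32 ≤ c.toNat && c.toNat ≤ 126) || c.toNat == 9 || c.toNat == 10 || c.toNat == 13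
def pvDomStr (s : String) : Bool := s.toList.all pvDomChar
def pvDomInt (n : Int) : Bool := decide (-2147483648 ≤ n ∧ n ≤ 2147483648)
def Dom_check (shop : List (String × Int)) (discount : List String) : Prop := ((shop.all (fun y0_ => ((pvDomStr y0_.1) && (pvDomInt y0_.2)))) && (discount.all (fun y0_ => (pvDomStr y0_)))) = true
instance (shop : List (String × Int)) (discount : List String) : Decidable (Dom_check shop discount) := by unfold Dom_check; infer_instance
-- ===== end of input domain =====

-- B replaces A's copy-and-decrement scan of the discount list by a frequency table of
-- the discount list checked once against the wanted counts (idiomatic; mutates nothing).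

-- ===== PORT A =====
def check (shop : List (String × Int)) (discount : List String) : Bool :=
  let tmp := discount.foldl
    (fun tmp t =>
      if tmp.contains t then
        if tmp.getD t 0 > 0 then tmp.modify t 0 (fun x => x - 1) else tmp
      else tmp)
    (PySem.Dict.mk shop)
  if tmp.values.sum = 0 then true else false

-- ===== PORT B =====
def check_alt (shop : List (String × Int)) (discount : List String) : Bool :=
  let cnt := discount.foldl (fun cnt t => cnt.insert t (cnt.getD t 0 + 1))
    (PySem.Dict.empty : PySem.Dict String Int)
  shop.all (fun p => decide (cnt.getD p.1 0 ≥ p.2))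

-- ===== PRECONDITION & SPEC =====
-- Pre_ excludes shops with a NEGATIVE wanted count — a nonsense input on which A's
-- clamp-and-sum (which can even cancel a negative against an unmet positive wish) and
-- B's count comparison are both defensible and differ — and association lists with
-- duplicate keys, which a real Python dict argument can never be.
def Pre_check (shop : List (String × Int)) (discount : List String) : Prop :=
  (shop.map Prod.fst).Nodup ∧ ∀ p ∈ shop, 0 ≤ p.2
instance (shop : List (String × Int)) (discount : List String) : Decidable (Pre_check shop discount) := by unfold Pre_check; infer_instance

def pvWitness_check : (List (String × Int)) × List String :=
  ([("mask", 2), ("rice", 1)], ["mask", "rice", "mask"])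

def Spec_check (shop : List (String × Int)) (discount : List String) (out : Bool) : Prop := out = check_alt shop discount
instance (shop : List (String × Int)) (discount : List String) (out : Bool) : Decidable (Spec_check shop discount out) := by unfold Spec_check; infer_instance

-- ===== CLAIM (what is proved, stated in full; the proofs are below) =====
def Claim_equal_check : Prop := ∀ (shop : List (String × Int)) (discount : List String), Dom_check shop discount → Pre_check shop discount → Spec_check shop discount (check shop discount)

-- ===== LEMMAS AND PROOFS =====

-- A's loop body, named so the lemmas can speak about it (the port spells it out inline).
def stepA (tmp : PySem.Dict String Int) (t : String) : PySem.Dict String Int :=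
  if tmp.contains t then
    if tmp.getD t 0 > 0 then tmp.modify t 0 (fun x => x - 1) else tmp
  else tmp

theorem stepA_keys (d : PySem.Dict String Int) (t : String) : (stepA d t).keys = d.keys := by
  unfold stepA
  split_ifs with h1 h2
  · rw [PySem.Dict.keys_modify]
    exact PySem.Dict.keys_insert_of_contains d _ h1
  · rfl
  · rfl

theorem loopA_keys (l : List String) (d : PySem.Dict String Int) :
    (l.foldl stepA d).keys = d.keys := by
  induction l generalizing d with
  | nil => rfl
  | cons t l ih => rw [List.foldl_cons, ih, stepA_keys]

-- A's loop computes, at each key of the starting dict, the wanted count minus the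
-- number of discounts for it, clamped at zero (given a non-negative start).
theorem loopA_getD (l : List String) (d : PySem.Dict String Int) (k : String)
    (hk : 0 ≤ d.getD k 0) :
    (l.foldl stepA d).getD k 0 =
      if d.contains k then max (d.getD k 0 - l.count k) 0 else d.getD k 0 := by
  induction l generalizing d with
  | nil =>
    rw [List.foldl_nil, List.count_nil]
    split_ifs <;> omega
  | cons t l ih =>
    rw [List.foldl_cons, List.count_cons]
    by_cases hc : d.contains t
    · by_cases hpos : d.getD t 0 > 0
      · have hstep : stepA d t = d.modify t 0 (fun x => x - 1) := by
          unfold stepA; rw [if_pos hc, if_pos hpos]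
        rw [hstep]
        have hk' : 0 ≤ (d.modify t 0 (fun x => x - 1)).getD k 0 := by
          rw [PySem.Dict.getD_modify]; split_ifs with h
          · subst h; omega
          · exact hk
        rw [ih _ hk', PySem.Dict.contains_modify, PySem.Dict.getD_modify]
        by_cases hkt : k = t
        · subst hkt
          simp only [beq_self_eq_true, Bool.true_or, hc, if_true]
          push_cast
          omega
        · have hbeq : (k == t) = false := by simpa using hkt
          have hbeq2 : (t == k) = false := by simpa using Ne.symm hkt
          simp only [hbeq, hbeq2, Bool.false_or, if_neg hkt, Bool.false_eq_true, if_false, Nat.add_zero]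
      · have hstep : stepA d t = d := by
          unfold stepA; rw [if_pos hc, if_neg hpos]
        rw [hstep, ih _ hk]
        by_cases hkt : k = t
        · subst hkt
          have h0 : d.getD k 0 = 0 := by omega
          simp only [beq_self_eq_true, h0, hc, if_true]
          push_cast
          omega
        · have hbeq2 : (t == k) = false := by simpa using Ne.symm hkt
          simp only [hbeq2, Bool.false_eq_true, if_false, Nat.add_zero]
    · have hstep : stepA d t = d := by
        unfold stepA; rw [if_neg hc]
      rw [hstep, ih _ hk]
      by_cases hkt : k = t
      · subst hkt
        simp only [if_neg hc]
      · have hbeq2 : (t == k) = false := by simpa using Ne.symm hkt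
        simp only [hbeq2, Bool.false_eq_true, if_false, Nat.add_zero]

-- A sum of clamped shortfalls is zero iff every wish is met (wishes non-negative).
theorem sum_max_zero (shop : List (String × Int)) (c : String → Int)
    (hv : ∀ p ∈ shop, 0 ≤ p.2) :
    ((shop.map (fun p => max (p.2 - c p.1) 0)).sum = 0 ↔ ∀ p ∈ shop, p.2 ≤ c p.1) := by
  induction shop with
  | nil => simp
  | cons p l ih =>
    have hrest : 0 ≤ (l.map (fun p => max (p.2 - c p.1) 0)).sum := by
      apply List.sum_nonneg
      intro x hx
      rcases List.mem_map.1 hx with ⟨q, _, rfl⟩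
      exact le_max_right _ _
    have hhead : 0 ≤ max (p.2 - c p.1) 0 := le_max_right _ _
    rw [List.map_cons, List.sum_cons]
    have ihl := ih (fun q hq => hv q (List.mem_cons_of_mem _ hq))
    constructor
    · intro h
      have h1 : max (p.2 - c p.1) 0 = 0 := by omega
      have h2 : (l.map (fun p => max (p.2 - c p.1) 0)).sum = 0 := by omega
      intro q hq
      rcases List.mem_cons.1 hq with rfl | hq'
      · have := max_eq_right_iff.1 h1; omega
      · exact ihl.1 h2 q hq'
    · intro h
      have h1 : max (p.2 - c p.1) 0 = 0 := by
        have := h p (List.mem_cons_self); omega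
      have h2 : (l.map (fun p => max (p.2 - c p.1) 0)).sum = 0 :=
        ihl.2 (fun q hq => h q (List.mem_cons_of_mem _ hq))
      omega

theorem check_eq (shop : List (String × Int)) (discount : List String)
    (hnd : (shop.map Prod.fst).Nodup) (hv : ∀ p ∈ shop, 0 ≤ p.2) :
    check shop discount = check_alt shop discount := by
  unfold check check_alt
  have hstep : (fun (tmp : PySem.Dict String Int) t =>
      if tmp.contains t then
        if tmp.getD t 0 > 0 then tmp.modify t 0 (fun x => x - 1) else tmp
      else tmp) = stepA := rfl
  rw [hstep]
  set tmp := discount.foldl stepA (PySem.Dict.mk shop) with htmp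
  have hkeys0 : (PySem.Dict.mk shop).keys = shop.map Prod.fst := rfl
  have hkeys : tmp.keys = shop.map Prod.fst := by rw [htmp, loopA_keys, hkeys0]
  have hnd' : tmp.keys.Nodup := by rw [hkeys]; exact hnd
  have hitems0 : (PySem.Dict.mk shop).items = shop := rfl
  have hget : ∀ p ∈ shop, tmp.getD p.1 0 = max (p.2 - (discount.count p.1 : Int)) 0 := by
    intro p hp
    have hmem : (p.1, p.2) ∈ (PySem.Dict.mk shop).items := by rw [hitems0]; exact hp
    have hg0 : (PySem.Dict.mk shop).getD p.1 0 = p.2 :=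
      PySem.Dict.getD_of_mem_items _ hmem (by rw [hkeys0]; exact hnd) 0
    have hc0 : (PySem.Dict.mk shop).contains p.1 = true := by
      rw [PySem.Dict.contains_eq_decide_mem_keys, hkeys0]
      simp only [decide_eq_true_eq]
      exact List.mem_map_of_mem hp
    rw [htmp, loopA_getD _ _ _ (by rw [hg0]; exact hv p hp), if_pos hc0, hg0]
  have hvals : tmp.values.sum = (shop.map (fun p => max (p.2 - (discount.count p.1 : Int)) 0)).sum := by
    rw [PySem.Dict.values_eq_map_keys tmp hnd' 0, hkeys, List.map_map]
    congr 1
    exact List.map_congr_left (fun p hp => hget p hp)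
  have hcnt : ∀ (k : String),
      (discount.foldl (fun cnt t => cnt.insert t (cnt.getD t 0 + 1))
        (PySem.Dict.empty : PySem.Dict String Int)).getD k 0 = (discount.count k : Int) := by
    intro k
    rw [PySem.Dict.getD_foldl_insert_add_one]
    simp
  simp only [hvals, hcnt]
  by_cases hs : (shop.map (fun p => max (p.2 - (discount.count p.1 : Int)) 0)).sum = 0
  · rw [if_pos hs]
    symm
    rw [List.all_eq_true]
    intro p hp
    simp only [decide_eq_true_eq, ge_iff_le]
    exact (sum_max_zero shop (fun k => (discount.count k : Int)) hv).1 hs p hp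
  · rw [if_neg hs]
    symm
    rw [Bool.eq_false_iff]
    intro hall
    apply hs
    exact (sum_max_zero shop (fun k => (discount.count k : Int)) hv).2 (by
      intro p hp
      have := List.all_eq_true.1 hall p hp
      simpa using this)

-- ===== VERDICT (by name: the statement is the Claim_ definition above) =====
theorem check_spec : Claim_equal_check := by
  intro shop discount _ hpre
  unfold Spec_check
  exact check_eq shop discount hpre.1 hpre.2
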